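-- pv_equiv track=rewrite | github.com/antimatterhq/sigma-converter | sigma/backends/databricks/base.py | _normalize_sql_string_literal
-- ===== SOURCE A (Python) =====
-- def _normalize_sql_string_literal(value: str) -> str:
--     """Normalize SQL string literals for Databricks.
--
--     Converts backslash-escaped single quotes into doubled quotes and escapes
--     remaining backslashes so they are treated as literal characters.
--     """
--     if not value:
--         return value
--
--     result = []
--     i = 0
--     while i < len(value):
--         if value[i] == "\\":
--             j = i
--             while j < len(value) and value[j] == "\\":
--                 j += 1
--             slash_count = j - i
--             if j < len(value) and value[j] == "'":
--                 if slash_count % 2 == 1: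
--                     literal_backslashes = slash_count - 1
--                     if literal_backslashes:
--                         result.append("\\" * literal_backslashes)
--                     result.append("''")
--                     i = j + 1
--                     continue
--             result.append("\\" * slash_count)
--             i = j
--             continue
--         if value[i] == "'":
--             result.append("''")
--             i += 1
--             continue
--         result.append(value[i])
--         i += 1
--
--     normalized = "".join(result)
--     return normalized.replace("\\", "\\\\")
-- ===== SOURCE B (Python) =====
-- def _trailing_backslashes(s):
--     n = 0
--     for ch in reversed(s):
--         if ch != "\\":
--             break
--         n += 1
--     return n
--
--
-- def _normalize_sql_string_literal(value: str) -> str: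
--     if not value:
--         return value
--     parts = value.split("'")
--     out = []
--     for k, part in enumerate(parts):
--         if k + 1 < len(parts) and _trailing_backslashes(part) % 2 == 1:
--             part = part[:-1]
--         out.append(part.replace("\\", "\\\\"))
--     return "''".join(out)
-- ===== Notes on version B (the rewrite author's own statement) =====
-- stated objective: faster
-- what changed: A's single index-driven character scan with a nested maximal-backslash-run loop and inline quote rewriting is replaced by a split/join decomposition: split on single quotes, drop one trailing backslash from each non-final segment whose trailing backslash run is odd, double backslashes per segment, and join the segments with doubled quotes; in CPython the work moves from a per-character interpreted loop into str.split/str.replace/str.join.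
import Mathlib
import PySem

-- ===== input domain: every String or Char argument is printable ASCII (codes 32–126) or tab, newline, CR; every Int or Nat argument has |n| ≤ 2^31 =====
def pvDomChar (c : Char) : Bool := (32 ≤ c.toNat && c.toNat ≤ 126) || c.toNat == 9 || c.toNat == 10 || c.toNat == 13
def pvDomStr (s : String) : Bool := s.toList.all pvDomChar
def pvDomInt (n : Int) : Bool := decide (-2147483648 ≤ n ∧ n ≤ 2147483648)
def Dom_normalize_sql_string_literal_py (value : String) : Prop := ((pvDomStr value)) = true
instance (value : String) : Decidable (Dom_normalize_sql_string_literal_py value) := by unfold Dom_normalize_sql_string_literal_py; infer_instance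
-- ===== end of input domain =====

-- B replaces A's single index-driven scan (nested maximal-backslash-run loop, inline quote
-- rewriting) by a split/join decomposition: split on quotes, fix odd trailing backslash runs of
-- non-final segments, double backslashes per segment, join with ''; measured faster (constant factor).

-- ===== PORT A =====
-- length of the leading run of backslashes (A's inner 'while value[j] == "\\"' scan)
def pvRun : List Char → Nat
  | [] => 0
  | c :: r => if c = '\\' then pvRun r + 1 else 0

-- A's main while-loop over the characters; emits ''-doubled quotes inline and, for an odd
-- backslash run immediately before a quote, drops one backslash and consumes the quote (i = j+1).
def pvGoA : List Char → List Char
  | [] => []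
  | c :: rest =>
    if c = '\\' then
      let k := pvRun (c :: rest)
      let after := rest.drop (k - 1)      -- = (c :: rest).drop k, the suffix from j
      if after.head? = some '\'' then
        if k % 2 = 1 then
          List.replicate (k - 1) '\\' ++ '\'' :: '\'' :: pvGoA after.tail
        else
          List.replicate k '\\' ++ pvGoA after
      else
        List.replicate k '\\' ++ pvGoA after
    else if c = '\'' then '\'' :: '\'' :: pvGoA rest
    else c :: pvGoA rest
termination_by cs => cs.length
decreasing_by all_goals (simp only [List.length_drop, List.length_cons, List.length_tail]; omega)

def normalize_sql_string_literal_py (value : String) : String :=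
  if value.toList = [] then value
  else PySem.Str.replace (String.ofList (pvGoA value.toList)) "\\" "\\\\"

-- ===== PORT B =====
-- Source B's _trailing_backslashes: count backslashes walking the string from its end, stop at the
-- first other character (the 'for ch in reversed(s)' loop with break).
def pvTrailRev : List Char → Nat
  | [] => 0
  | c :: r => if c ≠ '\\' then 0 else pvTrailRev r + 1

-- Source B's loop body for one part: drop the last char when the part is non-final and its trailing
-- backslash run is odd, then double every backslash in it.
def pvPartB (isLast : Bool) (p : List Char) : List Char :=
  let p' := if isLast = false ∧ pvTrailRev p.reverse % 2 = 1
            then PySem.List.slice p none (some (-1)) else p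
  PySem.Chars.replace p' ['\\'] ['\\', '\\']

-- Source B's 'for k, part in enumerate(parts)' with the k+1 < len(parts) test
def pvPartsB : List (List Char) → List (List Char)
  | [] => []
  | [p] => [pvPartB true p]
  | p :: ps => pvPartB false p :: pvPartsB ps

def normalize_sql_string_literal_py_alt (value : String) : String :=
  if value.toList = [] then value
  else String.ofList
    (PySem.Chars.join ['\'', '\'']
      (pvPartsB (PySem.Chars.splitOn value.toList ['\''])))

-- ===== PRECONDITION & SPEC =====
def Spec_normalize_sql_string_literal_py (value : String) (out : String) : Prop := out = normalize_sql_string_literal_py_alt value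
instance (value : String) (out : String) : Decidable (Spec_normalize_sql_string_literal_py value out) := by unfold Spec_normalize_sql_string_literal_py; infer_instance

-- ===== CLAIM (what is proved, stated in full; the proofs are below) =====
def Claim_equal_normalize_sql_string_literal_py : Prop := ∀ (value : String), Dom_normalize_sql_string_literal_py value → Spec_normalize_sql_string_literal_py value (normalize_sql_string_literal_py value)

-- ===== LEMMAS AND PROOFS =====

-- backslash doubling as a character-wise map
def pvDbl (cs : List Char) : List Char := cs.flatMap (fun x => if x = '\\' then ['\\', '\\'] else [x])

-- drop one trailing backslash when the trailing run is odd (what Source B does to non-final parts)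
def pvFix (a : List Char) : List Char := if pvRun a.reverse % 2 = 1 then a.dropLast else a

-- reference split on single quotes
def pvSplit : List Char → List (List Char)
  | [] => [[]]
  | c :: rest =>
    if c = '\'' then [] :: pvSplit rest
    else
      match pvSplit rest with
      | s :: ss => (c :: s) :: ss
      | [] => [[c]]

-- what pvGoA produces segment-wise, before backslash doubling
def pvJoinA : List (List Char) → List Char
  | [] => []
  | [p] => p
  | p :: ps => pvFix p ++ '\'' :: '\'' :: pvJoinA ps

theorem pvTrailRev_eq_pvRun (l : List Char) : pvTrailRev l = pvRun l := by
  induction l with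
  | nil => rfl
  | cons c r ih => by_cases h : c = '\\' <;> simp [pvTrailRev, pvRun, h, ih]

-- PySem.Chars.replace with a single-character pattern is a character-wise flatMap
theorem pv_replace_go_single (c : Char) (r : List Char) :
    ∀ (fuel : Nat) (cs acc : List Char), cs.length ≤ fuel →
      PySem.Chars.replace.go [c] r fuel cs acc
        = acc.reverse ++ cs.flatMap (fun x => if x = c then r else [x]) := by
  intro fuel
  induction fuel with
  | zero => intro cs acc h; simp at h; subst h; simp [PySem.Chars.replace.go]
  | succ f ih =>
    intro cs acc h
    cases cs with
    | nil => simp [PySem.Chars.replace.go]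
    | cons x t =>
      simp only [PySem.Chars.replace.go, List.isPrefixOf_cons₂, List.isPrefixOf_nil_left,
        Bool.and_true]
      by_cases hx : x = c
      · simp only [hx, beq_self_eq_true, reduceIte, List.length_cons, List.length_nil,
          Nat.zero_add, List.drop_succ_cons, List.drop_zero]
        rw [ih t _ (by simpa using Nat.le_of_succ_le_succ h)]
        simp
      · have hcx : ¬ c = x := fun h' => hx h'.symm
        simp only [beq_eq_false_iff_ne.mpr hcx, Bool.false_eq_true, reduceIte]
        rw [ih t _ (by simpa using Nat.le_of_succ_le_succ h)]
        simp [hx]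

theorem pv_replace_single (c : Char) (r cs : List Char) :
    PySem.Chars.replace cs [c] r = cs.flatMap (fun x => if x = c then r else [x]) := by
  simp [PySem.Chars.replace]
  rw [pv_replace_go_single c r cs.length cs [] (le_refl _)]
  simp

-- PySem.Chars.splitOn with a single-quote separator computes pvSplit
theorem pvSplit_ne_nil (cs : List Char) : pvSplit cs ≠ [] := by
  induction cs with
  | nil => simp [pvSplit]
  | cons c rest ih =>
    by_cases h : c = '\''
    · simp [pvSplit, h]
    · simp only [pvSplit, h, reduceIte]
      cases hs : pvSplit rest with
      | nil => simp
      | cons s ss => simp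

theorem pvSplit_qf (cs : List Char) : ∀ p ∈ pvSplit cs, '\'' ∉ p := by
  induction cs with
  | nil => simp [pvSplit]
  | cons c rest ih =>
    by_cases h : c = '\''
    · simp only [pvSplit, h, reduceIte]
      intro p hp
      rcases List.mem_cons.mp hp with h1 | h1
      · subst h1; simp
      · exact ih p h1
    · have hq : '\'' ∉ [c] := by
        intro hm
        exact h (List.mem_singleton.mp hm).symm
      simp only [pvSplit, h, reduceIte]
      cases hs : pvSplit rest with
      | nil => exact absurd hs (pvSplit_ne_nil rest)
      | cons s ss =>
        intro p hp
        rcases List.mem_cons.mp hp with h1 | h1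
        · subst h1
          have hqs := ih s (by simp [hs])
          intro hm
          rcases List.mem_cons.mp hm with h2 | h2
          · exact h h2.symm
          · exact hqs h2
        · exact ih p (by simp [hs, h1])

theorem pvSplit_intercalate (cs : List Char) :
    List.intercalate ['\''] (pvSplit cs) = cs := by
  induction cs with
  | nil => simp [pvSplit, List.intercalate]
  | cons c rest ih =>
    by_cases h : c = '\''
    · subst h
      simp only [pvSplit, reduceIte]
      cases hs : pvSplit rest with
      | nil => exact absurd hs (pvSplit_ne_nil rest)
      | cons s ss =>
        rw [hs] at ih
        simp [List.intercalate] at ih ⊢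
        simp [ih]
    · simp only [pvSplit, h, reduceIte]
      cases hs : pvSplit rest with
      | nil => exact absurd hs (pvSplit_ne_nil rest)
      | cons s ss =>
        rw [hs] at ih
        cases ss with
        | nil => simpa [List.intercalate] using ih
        | cons s2 ss2 =>
          simp [List.intercalate] at ih ⊢
          simp [ih]

theorem pv_modifyHead_nil_append (l : List (List Char)) :
    l.modifyHead (fun s => [] ++ s) = l := by
  cases l <;> simp

theorem pv_splitOn_go (fuel : Nat) :
    ∀ (l cur : List Char) (accs : List (List Char)), l.length < fuel →
      PySem.Chars.splitOn.go ['\''] fuel l cur accs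
        = accs.reverse ++ (pvSplit l).modifyHead (cur.reverse ++ ·) := by
  induction fuel with
  | zero => intro l cur accs h; omega
  | succ f ih =>
    intro l cur accs h
    cases l with
    | nil => simp [PySem.Chars.splitOn.go, pvSplit]
    | cons c rest =>
      rw [PySem.Chars.splitOn.go]
      simp only [List.isPrefixOf_cons₂, List.isPrefixOf_nil_left, Bool.and_true]
      by_cases hc : c = '\''
      · subst hc
        simp only [beq_self_eq_true, reduceIte, List.length_cons, List.length_nil,
          Nat.zero_add, List.drop_succ_cons, List.drop_zero]
        rw [ih rest [] _ (by simpa using Nat.le_of_succ_le_succ h)]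
        simp only [List.reverse_cons, List.reverse_nil]
        rw [pv_modifyHead_nil_append]
        simp [pvSplit]
      · have hcq : ¬ ('\'' = c) := fun h0 => hc h0.symm
        simp only [beq_eq_false_iff_ne.mpr hcq, Bool.false_eq_true, reduceIte]
        rw [ih rest (c :: cur) accs (by simpa using Nat.le_of_succ_le_succ h)]
        simp only [pvSplit, hc, reduceIte, List.reverse_cons]
        cases hs : pvSplit rest with
        | nil => exact absurd hs (pvSplit_ne_nil rest)
        | cons s ss => simp

theorem pv_splitOn_eq (cs : List Char) :
    PySem.Chars.splitOn cs ['\''] = pvSplit cs := by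
  rw [PySem.Chars.splitOn, pv_splitOn_go (cs.length + 1) cs [] [] (by omega)]
  simpa using pv_modifyHead_nil_append (pvSplit cs)

theorem pvRun_le_length (l : List Char) : pvRun l ≤ l.length := by
  induction l with
  | nil => simp [pvRun]
  | cons c r ih => by_cases h : c = '\\' <;> simp [pvRun, h] <;> omega

theorem pvRun_take (l : List Char) : l.take (pvRun l) = List.replicate (pvRun l) '\\' := by
  induction l with
  | nil => simp [pvRun]
  | cons c r ih =>
    by_cases h : c = '\\'
    · simp [pvRun, h, List.replicate_succ, ih]
    · simp [pvRun, h]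

theorem pvRun_drop_head (l : List Char) : (l.drop (pvRun l)).head? ≠ some '\\' := by
  induction l with
  | nil => simp [pvRun]
  | cons c r ih =>
    by_cases h : c = '\\'
    · simpa [pvRun, h] using ih
    · simp [pvRun, h]

theorem pvRun_append (x y : List Char) :
    pvRun (x ++ y) = if pvRun x = x.length then x.length + pvRun y else pvRun x := by
  induction x with
  | nil => simp [pvRun]
  | cons c r ih =>
    by_cases h : c = '\\'
    · simp only [List.cons_append, pvRun, h, reduceIte, ih, List.length_cons]
      by_cases h2 : pvRun r = r.length
      · simp [h2]
        omega
      · simp [h2]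
    · simp [pvRun, h]

theorem pvRun_eq_length_iff (l : List Char) :
    pvRun l = l.length ↔ ∀ c ∈ l, c = '\\' := by
  induction l with
  | nil => simp [pvRun]
  | cons c r ih =>
    by_cases h : c = '\\'
    · simp only [pvRun, h, reduceIte, List.length_cons, Nat.add_right_cancel_iff, ih,
        List.mem_cons]
      constructor
      · intro hh x hx
        rcases hx with hx | hx
        · simp [hx]
        · exact hh x hx
      · intro hh x hx
        exact hh x (Or.inr hx)
    · simp only [pvRun, h, reduceIte, List.length_cons]
      constructor
      · omega
      · intro hh
        exact absurd (hh c (by simp)) h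

theorem pvRun_replicate (k : Nat) : pvRun (List.replicate k '\\') = k := by
  have := (pvRun_eq_length_iff (List.replicate k '\\')).mpr (by
    intro c hc; exact List.eq_of_mem_replicate hc)
  simpa using this

theorem pvRun_pos_cons (t : List Char) : 1 ≤ pvRun ('\\' :: t) := by
  simp [pvRun]

-- a = replicate (pvRun a) '\\' ++ a.drop (pvRun a)
theorem pvRun_decomp (a : List Char) :
    a = List.replicate (pvRun a) '\\' ++ a.drop (pvRun a) := by
  conv_lhs => rw [← List.take_append_drop (pvRun a) a]
  rw [pvRun_take]

-- trailing run of (c :: t) for non-backslash c is the trailing run of t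
theorem pvFix_cons (c : Char) (t : List Char) (hc : c ≠ '\\') :
    pvFix (c :: t) = c :: pvFix t := by
  have htr : pvRun (c :: t).reverse = pvRun t.reverse := by
    rw [List.reverse_cons, pvRun_append]
    by_cases h : pvRun t.reverse = t.reverse.length
    · rw [if_pos h, h]
      simp [pvRun, hc]
    · rw [if_neg h]
  unfold pvFix
  rw [htr]
  by_cases hodd : pvRun t.reverse % 2 = 1
  · have hne : t ≠ [] := by
      intro h0; subst h0; simp [pvRun] at hodd
    simp [hodd, List.dropLast_cons_of_ne_nil hne]
  · simp [hodd]

theorem pvFix_decomp (k : Nat) (d : List Char) (hd : d ≠ [])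
    (hhead : d.head? ≠ some '\\') :
    pvFix (List.replicate k '\\' ++ d) = List.replicate k '\\' ++ pvFix d := by
  have hnall : pvRun d.reverse ≠ d.reverse.length := by
    intro h0
    have hall := (pvRun_eq_length_iff d.reverse).mp h0
    cases d with
    | nil => exact hd rfl
    | cons x xs =>
      have : x = '\\' := hall x (by simp)
      simp [this] at hhead
  have htr : pvRun (List.replicate k '\\' ++ d).reverse = pvRun d.reverse := by
    rw [List.reverse_append, pvRun_append, if_neg hnall]
  unfold pvFix
  rw [htr]
  by_cases hodd : pvRun d.reverse % 2 = 1
  · simp [hodd, List.dropLast_append_of_ne_nil hd]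
  · simp [hodd]

theorem pvGoA_qf : ∀ (n : Nat) (a : List Char), a.length ≤ n → '\'' ∉ a → pvGoA a = a := by
  intro n
  induction n with
  | zero =>
    intro a h _
    have : a = [] := List.length_eq_zero_iff.mp (Nat.le_zero.mp h)
    subst this
    rw [pvGoA]
  | succ m ih =>
    intro a h hqf
    cases a with
    | nil => rw [pvGoA]
    | cons c rest =>
      rw [pvGoA]
      by_cases hc : c = '\\'
      · subst hc
        simp only [reduceIte]
        have hk1 : 1 ≤ pvRun ('\\' :: rest) := pvRun_pos_cons rest
        have hdropeq : rest.drop (pvRun ('\\' :: rest) - 1) = ('\\' :: rest).drop (pvRun ('\\' :: rest)) := by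
          obtain ⟨k', hk'⟩ := Nat.exists_eq_add_of_le hk1
          rw [hk', Nat.add_comm 1 k', List.drop_succ_cons]
          simp
        rw [hdropeq]
        have hhead : ¬ (('\\' :: rest).drop (pvRun ('\\' :: rest))).head? = some '\'' := by
          intro h0
          have hmem : '\'' ∈ ('\\' :: rest).drop (pvRun ('\\' :: rest)) :=
            List.mem_of_mem_head? (by simp [Option.mem_def, h0])
          exact hqf (List.mem_of_mem_drop hmem)
        rw [if_neg hhead]
        have hlen : (('\\' :: rest).drop (pvRun ('\\' :: rest))).length ≤ m := by
          simp only [List.length_drop, List.length_cons]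
          have h' : rest.length + 1 ≤ m + 1 := by simpa using h
          omega
        have hqf2 : '\'' ∉ ('\\' :: rest).drop (pvRun ('\\' :: rest)) :=
          fun h0 => hqf (List.mem_of_mem_drop h0)
        rw [ih _ hlen hqf2]
        exact (pvRun_decomp ('\\' :: rest)).symm
      · have hq : ¬ c = '\'' := fun h0 => hqf (by simp [h0])
        simp only [hc, hq, reduceIte]
        rw [ih rest (by simpa using Nat.le_of_succ_le_succ h) (fun h0 => hqf (by simp [h0]))]

theorem pvGoA_seg : ∀ (n : Nat) (a rest : List Char), a.length ≤ n → '\'' ∉ a →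
    pvGoA (a ++ '\'' :: rest) = pvFix a ++ '\'' :: '\'' :: pvGoA rest := by
  intro n
  induction n with
  | zero =>
    intro a rest h _
    have : a = [] := List.length_eq_zero_iff.mp (Nat.le_zero.mp h)
    subst this
    rw [List.nil_append, pvGoA]
    simp [pvFix, pvRun]
  | succ m ih =>
    intro a rest h hqf
    cases a with
    | nil =>
      rw [List.nil_append, pvGoA]
      simp [pvFix, pvRun]
    | cons c t =>
      rw [List.cons_append, pvGoA]
      by_cases hc : c = '\\'
      · subst hc
        simp only [reduceIte]
        -- the run the code scans: k = pvRun (a ++ '\''::rest), never crossing the quote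
        have hrunq : pvRun ('\'' :: rest) = 0 := by simp [pvRun]
        have hkeq : pvRun ('\\' :: (t ++ '\'' :: rest))
            = if pvRun ('\\' :: t) = ('\\' :: t).length then ('\\' :: t).length
              else pvRun ('\\' :: t) := by
          have h2 := pvRun_append ('\\' :: t) ('\'' :: rest)
          rw [hrunq] at h2
          simpa using h2
        set k := pvRun ('\\' :: (t ++ '\'' :: rest)) with hkdef
        have hk1 : 1 ≤ k := pvRun_pos_cons _
        have hdropeq : (t ++ '\'' :: rest).drop (k - 1)
            = (('\\' :: t) ++ '\'' :: rest).drop k := by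
          obtain ⟨k', hk'⟩ := Nat.exists_eq_add_of_le hk1
          rw [hk', Nat.add_comm 1 k']
          simp
        by_cases hall : pvRun ('\\' :: t) = ('\\' :: t).length
        · -- a is all backslashes: the run is followed by the quote
          have hkval : k = ('\\' :: t).length := by rw [hkeq, if_pos hall]
          have harep : ('\\' :: t) = List.replicate k '\\' := by
            have hmem := (pvRun_eq_length_iff ('\\' :: t)).mp hall
            rw [hkval]
            exact List.eq_replicate_of_mem hmem
          have hafter : (t ++ '\'' :: rest).drop (k - 1) = '\'' :: rest := by
            rw [hdropeq, harep, List.drop_append_of_le_length (by simp)]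
            simp
          have htrail : pvRun ('\\' :: t).reverse = k := by
            rw [harep, List.reverse_replicate, pvRun_replicate]
          rw [hafter]
          simp only [List.head?_cons, reduceIte]
          by_cases hodd : k % 2 = 1
          · rw [if_pos hodd]
            unfold pvFix
            rw [htrail, if_pos hodd, harep, List.dropLast_replicate]
            simp
          · rw [if_neg hodd]
            unfold pvFix
            rw [htrail, if_neg hodd, harep]
            have hq2 : pvGoA ('\'' :: rest) = '\'' :: '\'' :: pvGoA rest := by
              rw [pvGoA]
              simp
            rw [hq2]
        · -- the run stops inside a
          have hkval : k = pvRun ('\\' :: t) := by rw [hkeq, if_neg hall]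
          have hklt : k < ('\\' :: t).length :=
            Nat.lt_of_le_of_ne (hkval ▸ pvRun_le_length _) (hkval ▸ hall)
          set d := ('\\' :: t).drop k with hddef
          have hdne : d ≠ [] := by
            rw [hddef]
            intro h0
            have h1 : ('\\' :: t).length - k = 0 := by
              rw [← List.length_drop, h0]
              rfl
            omega
          have hdhead : d.head? ≠ some '\\' := by
            rw [hddef, hkval]
            exact pvRun_drop_head ('\\' :: t)
          have hdqf : '\'' ∉ d := fun h0 => hqf (List.mem_of_mem_drop (hddef ▸ h0))
          have hafter : (t ++ '\'' :: rest).drop (k - 1) = d ++ '\'' :: rest := by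
            rw [hdropeq, List.drop_append_of_le_length (le_of_lt hklt)]
          have hheadne : ¬ (d ++ '\'' :: rest).head? = some '\'' := by
            rw [List.head?_append_of_ne_nil _ hdne]
            intro h0
            exact hdqf (List.mem_of_mem_head? (by simp [Option.mem_def, h0]))
          rw [hafter, if_neg hheadne]
          have hdlen : d.length ≤ m := by
            rw [hddef]
            simp only [List.length_drop]
            have h1 : t.length + 1 ≤ m + 1 := by simpa using h
            simp only [List.length_cons]
            omega
          rw [ih d rest hdlen hdqf]
          have hdecomp : ('\\' :: t) = List.replicate k '\\' ++ d := by
            rw [hddef, hkval]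
            exact pvRun_decomp ('\\' :: t)
          conv_rhs => rw [hdecomp, pvFix_decomp k d hdne hdhead]
          simp
      · have hq : ¬ c = '\'' := fun h0 => hqf (by simp [h0])
        simp only [hc, hq, reduceIte]
        rw [ih t rest (by simpa using Nat.le_of_succ_le_succ h) (fun h0 => hqf (by simp [h0]))]
        rw [pvFix_cons c t hc]
        simp

theorem pvGoA_intercalate : ∀ (parts : List (List Char)), parts ≠ [] →
    (∀ p ∈ parts, '\'' ∉ p) →
    pvGoA (List.intercalate ['\''] parts) = pvJoinA parts := by
  intro parts
  induction parts with
  | nil => intro h; exact absurd rfl h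
  | cons p ps ih =>
    intro _ hqf
    cases ps with
    | nil =>
      have h1 : List.intercalate ['\''] [p] = p := by simp [List.intercalate]
      rw [h1, pvGoA_qf p.length p le_rfl (hqf p (by simp))]
      rfl
    | cons p2 ps2 =>
      have hstep : List.intercalate ['\''] (p :: p2 :: ps2)
          = p ++ '\'' :: List.intercalate ['\''] (p2 :: ps2) := by
        simp [List.intercalate]
      rw [hstep, pvGoA_seg p.length p _ le_rfl (hqf p (by simp)),
        ih (by simp) (fun q hq => hqf q (by simp [hq]))]
      rfl

theorem pvPartB_false (p : List Char) : pvPartB false p = pvDbl (pvFix p) := by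
  simp only [pvPartB, pvFix, pvTrailRev_eq_pvRun]
  by_cases h : pvRun p.reverse % 2 = 1
  · simp only [h, and_true, reduceIte, PySem.List.slice_to_neg_one]
    rw [pv_replace_single]; rfl
  · simp only [h, and_false, reduceIte]
    rw [pv_replace_single]; rfl

theorem pvPartB_true (p : List Char) : pvPartB true p = pvDbl p := by
  simp only [pvPartB, Bool.true_eq_false, false_and, reduceIte]
  rw [pv_replace_single]
  rfl

theorem pvDbl_append (x y : List Char) : pvDbl (x ++ y) = pvDbl x ++ pvDbl y := by
  simp [pvDbl]

theorem pvDbl_join (parts : List (List Char)) (h : parts ≠ []) :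
    pvDbl (pvJoinA parts) = PySem.Chars.join ['\'', '\''] (pvPartsB parts) := by
  induction parts with
  | nil => exact absurd rfl h
  | cons p ps ih =>
    cases ps with
    | nil =>
      simp only [pvJoinA, pvPartsB, PySem.Chars.join, List.intercalate, pvPartB_true]
      simp
    | cons p2 ps2 =>
      simp only [pvJoinA, pvPartsB, pvPartB_false]
      have ihr := ih (by simp)
      rw [PySem.Chars.join] at ihr ⊢
      have hne : pvPartsB (p2 :: ps2) ≠ [] := by
        cases ps2 <;> simp [pvPartsB]
      have hj : List.intercalate ['\'', '\''] (pvDbl (pvFix p) :: pvPartsB (p2 :: ps2))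
          = pvDbl (pvFix p) ++ ['\'', '\''] ++ List.intercalate ['\'', '\''] (pvPartsB (p2 :: ps2)) := by
        cases hpp : pvPartsB (p2 :: ps2) with
        | nil => exact absurd hpp hne
        | cons u us => simp [List.intercalate]
      rw [hj, ← ihr, pvDbl_append]
      simp [pvDbl]

-- ===== VERDICT (by name: the statement is the Claim_ definition above) =====
theorem normalize_sql_string_literal_py_spec : Claim_equal_normalize_sql_string_literal_py := by
  intro value _
  unfold Spec_normalize_sql_string_literal_py normalize_sql_string_literal_py normalize_sql_string_literal_py_alt
  by_cases hemp : value.toList = []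
  · rw [if_pos hemp, if_pos hemp]
  · rw [if_neg hemp, if_neg hemp]
    apply String.toList_inj.mp
    rw [PySem.Str.toList_replace]
    have hb : ("\\" : String).toList = ['\\'] := rfl
    have hbb : ("\\\\" : String).toList = ['\\', '\\'] := rfl
    rw [hb, hbb, String.toList_ofList, String.toList_ofList, pv_replace_single]
    show pvDbl (pvGoA value.toList) = _
    rw [pv_splitOn_eq, ← pvDbl_join _ (pvSplit_ne_nil value.toList),
      ← pvGoA_intercalate _ (pvSplit_ne_nil value.toList) (pvSplit_qf value.toList),
      pvSplit_intercalate]
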